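-- pv_equiv track=rewrite | github.com/mamanipatricia/algorithms | objects.py | isField
-- ===== SOURCE A (Python) =====
-- def isField(k):
--     fields = [  {'key': 'price', 'value': ['precio', 'precios'], },
--                 {'key': 'dimension', 'value': ['construido'], },
--                 {'key': 'bedroom',    'value': ['dormitorio', 'dormitorios'], },
--                 {'key': 'living_room',    'value': ['sala', 'sala de estar'], },
--                 {'key': 'dinning_room',    'value': ['comedor de diario'], },
--                 {'key': 'bath_room', 'value': ['baño', 'baños'], },
--                 {'key': 'garage',    'value': ['portón eléctrico', 'garaje', 'garajes'], },
--                 {'key': 'garden',    'value': ['jardín', ]},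
--                 {'key': 'pool',    'value': ['piscina'], },
--                 {'key': 'neighborhood', 'value': ['zona'], },
--                 {'key': 'city', 'value': ['ciudad'], },
--                 {'key': 'floor', 'value': ['piso', 'pisos'], },
--                 {'key': 'status', 'value': ['estado'], },
--                 {'key': 'year_built', 'value': ['año construcción'], },
--                 {'key': 'electricity_service', 'value': ['electricidad'], },
--                 {'key': 'water_service', 'value': ['agua'], },
--                 {'key': 'gas_service', 'value': ['gas natural'], },
--                 {'key': 'type_offer', 'value': ['alquiler', 'venta', 'anticrético']}
--              ]
--
--     # Searching a field in an object
--     for f in fields: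
--         for v in f['value']:
--             if v == k.lower():
--                 return f['key']
--
--     return 'error'
-- ===== SOURCE B (Python) =====
-- def isField(k):
--     # Binary search over a keyword-sorted flat table (keyword, field-key),
--     # instead of A's nested linear scan over grouped records.
--     PAIRS = (
--         ("agua", "water_service"),
--         ("alquiler", "type_offer"),
--         ("anticrético", "type_offer"),
--         ("año construcción", "year_built"),
--         ("baño", "bath_room"),
--         ("baños", "bath_room"),
--         ("ciudad", "city"),
--         ("comedor de diario", "dinning_room"),
--         ("construido", "dimension"),
--         ("dormitorio", "bedroom"),
--         ("dormitorios", "bedroom"),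
--         ("electricidad", "electricity_service"),
--         ("estado", "status"),
--         ("garaje", "garage"),
--         ("garajes", "garage"),
--         ("gas natural", "gas_service"),
--         ("jardín", "garden"),
--         ("piscina", "pool"),
--         ("piso", "floor"),
--         ("pisos", "floor"),
--         ("portón eléctrico", "garage"),
--         ("precio", "price"),
--         ("precios", "price"),
--         ("sala", "living_room"),
--         ("sala de estar", "living_room"),
--         ("venta", "type_offer"),
--         ("zona", "neighborhood"),
--     )
--     s = k.lower()
--     lo, hi = 0, len(PAIRS)
--     while lo < hi:
--         mid = (lo + hi) // 2
--         w, key = PAIRS[mid]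
--         if w == s:
--             return key
--         if w < s:
--             lo = mid + 1
--         else:
--             hi = mid
--     return 'error'
-- ===== Notes on version B (the rewrite author's own statement) =====
-- stated objective: alternative
-- what changed: Replaces the nested first-match scan over grouped {key, value-list} records by binary search over a single flat keyword-sorted (keyword, field-key) table.
import Mathlib
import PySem

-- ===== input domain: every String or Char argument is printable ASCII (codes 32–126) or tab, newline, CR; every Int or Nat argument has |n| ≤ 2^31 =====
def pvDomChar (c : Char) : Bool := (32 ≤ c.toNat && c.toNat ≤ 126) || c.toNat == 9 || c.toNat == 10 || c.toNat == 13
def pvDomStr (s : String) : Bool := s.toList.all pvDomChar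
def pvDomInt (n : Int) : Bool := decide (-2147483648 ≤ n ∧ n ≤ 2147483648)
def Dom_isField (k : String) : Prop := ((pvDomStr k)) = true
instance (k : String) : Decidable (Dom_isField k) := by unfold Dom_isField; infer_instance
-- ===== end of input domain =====

-- B replaces A's nested first-match scan over grouped records by binary search
-- over one flat keyword-sorted (keyword, field-key) table.

-- ===== PORT A =====
-- A's table: list of {'key': …, 'value': [keywords…]} records.
def fieldsA : List (String × List String) :=
  [ ("price", ["precio", "precios"]),
    ("dimension", ["construido"]),
    ("bedroom", ["dormitorio", "dormitorios"]),
    ("living_room", ["sala", "sala de estar"]),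
    ("dinning_room", ["comedor de diario"]),
    ("bath_room", ["baño", "baños"]),
    ("garage", ["portón eléctrico", "garaje", "garajes"]),
    ("garden", ["jardín"]),
    ("pool", ["piscina"]),
    ("neighborhood", ["zona"]),
    ("city", ["ciudad"]),
    ("floor", ["piso", "pisos"]),
    ("status", ["estado"]),
    ("year_built", ["año construcción"]),
    ("electricity_service", ["electricidad"]),
    ("water_service", ["agua"]),
    ("gas_service", ["gas natural"]),
    ("type_offer", ["alquiler", "venta", "anticrético"]) ]

-- the nested 'for f in fields: for v in f['value']: if v == k.lower(): return f['key']' loop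
def scanA (s : String) : List (String × List String) → String
  | [] => "error"
  | (key, vs) :: rest => if vs.any (fun v => v == s) then key else scanA s rest

def isField (k : String) : String := scanA (PySem.Str.lower k) fieldsA

-- ===== PORT B =====
-- B's flat table, sorted by keyword (Unicode code-point order, as Python sorts).
def pairsB : List (String × String) :=
  [ ("agua", "water_service"),
    ("alquiler", "type_offer"),
    ("anticrético", "type_offer"),
    ("año construcción", "year_built"),
    ("baño", "bath_room"),
    ("baños", "bath_room"),
    ("ciudad", "city"),
    ("comedor de diario", "dinning_room"),
    ("construido", "dimension"),
    ("dormitorio", "bedroom"),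
    ("dormitorios", "bedroom"),
    ("electricidad", "electricity_service"),
    ("estado", "status"),
    ("garaje", "garage"),
    ("garajes", "garage"),
    ("gas natural", "gas_service"),
    ("jardín", "garden"),
    ("piscina", "pool"),
    ("piso", "floor"),
    ("pisos", "floor"),
    ("portón eléctrico", "garage"),
    ("precio", "price"),
    ("precios", "price"),
    ("sala", "living_room"),
    ("sala de estar", "living_room"),
    ("venta", "type_offer"),
    ("zona", "neighborhood") ]

-- the 'while lo < hi' binary-search loop of Source B (fuel = interval length, which
-- strictly shrinks each iteration, so `pairs.length` fuel is always enough)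
def bsB (s : String) (pairs : List (String × String)) : Nat → Nat → Nat → String
  | 0, _, _ => "error"   -- unreachable: fuel ≥ hi - lo in every call made
  | fuel + 1, lo, hi =>
    if lo < hi then
      let mid := (lo + hi) / 2
      match pairs[mid]? with
      | some (w, key) =>
          if w == s then key
          else if PySem.Chars.strLt w.toList s.toList then bsB s pairs fuel (mid + 1) hi  -- Python str <
          else bsB s pairs fuel lo mid
      | none => "error"   -- unreachable: mid < hi ≤ len in every call made
    else "error"

def isField_alt (k : String) : String :=
  bsB (PySem.Str.lower k) pairsB pairsB.length 0 pairsB.length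

-- ===== PRECONDITION & SPEC =====
def Spec_isField (k : String) (out : String) : Prop := out = isField_alt k
instance (k : String) (out : String) : Decidable (Spec_isField k out) := by unfold Spec_isField; infer_instance

-- ===== CLAIM (what is proved, stated in full; the proofs are below) =====
def Claim_equal_isField : Prop := ∀ (k : String), Dom_isField k → Spec_isField k (isField k)

-- ===== LEMMAS AND PROOFS =====

-- all keywords of A's table, flattened
def klist : List String := fieldsA.flatMap Prod.snd

-- if s matches no keyword of the records, A's nested scan returns "error"
lemma scanA_notmem (s : String) (fs : List (String × List String))
    (h : ∀ v ∈ fs.flatMap Prod.snd, v ≠ s) : scanA s fs = "error" := by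
  induction fs with
  | nil => rfl
  | cons p rest ih =>
    obtain ⟨key, vs⟩ := p
    have hv : vs.any (fun v => v == s) = false := by
      rw [List.any_eq_false]
      intro v hvm
      simp only [beq_iff_eq]
      exact h v (by rw [List.flatMap_cons]; exact List.mem_append_left _ hvm)
    simp only [scanA, hv, Bool.false_eq_true, if_false]
    exact ih (fun v hvm => h v (by rw [List.flatMap_cons]; exact List.mem_append_right _ hvm))

-- if s matches no keyword of the flat table, B's binary search returns "error"
lemma bsB_notmem (s : String) (pairs : List (String × String))
    (h : ∀ p ∈ pairs, p.1 ≠ s) : ∀ fuel lo hi, bsB s pairs fuel lo hi = "error" := by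
  intro fuel
  induction fuel with
  | zero => intro lo hi; rfl
  | succ m ih =>
    intro lo hi
    rw [bsB]
    by_cases hlt : lo < hi
    · simp only [if_pos hlt]
      cases hm : pairs[(lo + hi) / 2]? with
      | none => rfl
      | some p =>
        obtain ⟨w, key⟩ := p
        have hne : w ≠ s := h (w, key) (List.mem_of_getElem? hm)
        have hbe : (w == s) = false := by simpa [beq_eq_false_iff_ne]
        simp only [hbe, Bool.false_eq_true, if_false]
        cases hws : PySem.Chars.strLt w.toList s.toList <;> simp [ih]
    · simp [if_neg hlt]

-- for any s (in particular k.lower()), the two algorithms agree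
lemma core (s : String) : scanA s fieldsA = bsB s pairsB pairsB.length 0 pairsB.length := by
  by_cases h : s ∈ klist
  · fin_cases h <;> decide
  · have hA : scanA s fieldsA = "error" := by
      refine scanA_notmem s fieldsA (fun v hv hvs => h ?_)
      rw [← hvs]; exact hv
    have hsub : ∀ p ∈ pairsB, p.1 ∈ klist := by decide
    have hB : bsB s pairsB pairsB.length 0 pairsB.length = "error" := by
      refine bsB_notmem s pairsB (fun p hp hps => h ?_) pairsB.length 0 pairsB.length
      rw [← hps]; exact hsub p hp
    rw [hA, hB]

-- ===== VERDICT (by name: the statement is the Claim_ definition above) =====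
theorem isField_spec : Claim_equal_isField := by
  intro k _
  unfold Spec_isField isField isField_alt
  exact core (PySem.Str.lower k)
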